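-- pv_equiv track=rewrite | github.com/RiboBase/snakescale | scripts/guess_adapters.py | count_all_kmers
-- ===== SOURCE A (Python) =====
-- def count_all_kmers(fastq_reads, kmers):
--     kmer_counters = { x: 0 for x in kmers  }
--     # Count all kmers
--     for this_read in fastq_reads:
--         for k in kmers:
--             search_result = this_read.find(k)
--             if search_result >= 0:
--                 kmer_counters[k] += 1
--
--     return kmer_counters
-- ===== SOURCE B (Python) =====
-- def count_all_kmers(fastq_reads, kmers):
--     # Distinct kmer lengths; one window pass per read per length.
--     lengths = {len(k) for k in kmers}
--     read_subs = []
--     for read in fastq_reads: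
--         subs = set()
--         n = len(read)
--         for L in lengths:
--             for i in range(n - L + 1):
--                 subs.add(read[i:i+L])
--         read_subs.append(subs)
--     mult = {}
--     for k in kmers:
--         mult[k] = mult.get(k, 0) + 1
--     return {k: m * sum(1 for subs in read_subs if k in subs) for k, m in mult.items()}
-- ===== Notes on version B (the rewrite author's own statement) =====
-- stated objective: faster
-- what changed: Instead of running str.find for every (read, kmer) pair, B slides a window over each read once per DISTINCT kmer length collecting the windows into a set, then returns each kmer's count as its multiplicity in kmers times the number of reads whose window set contains it.
import Mathlib
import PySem

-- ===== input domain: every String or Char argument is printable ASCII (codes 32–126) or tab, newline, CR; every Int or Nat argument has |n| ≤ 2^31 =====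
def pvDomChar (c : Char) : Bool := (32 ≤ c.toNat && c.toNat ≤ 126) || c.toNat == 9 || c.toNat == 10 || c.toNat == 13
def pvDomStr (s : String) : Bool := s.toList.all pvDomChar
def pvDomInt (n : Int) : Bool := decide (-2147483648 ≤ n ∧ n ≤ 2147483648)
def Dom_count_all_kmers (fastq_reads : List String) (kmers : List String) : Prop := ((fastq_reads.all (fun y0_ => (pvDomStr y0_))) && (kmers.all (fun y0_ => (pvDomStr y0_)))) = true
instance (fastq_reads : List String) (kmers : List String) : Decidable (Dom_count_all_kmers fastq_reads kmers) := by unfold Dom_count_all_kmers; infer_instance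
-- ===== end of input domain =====

-- B replaces A's per-(read, kmer) str.find scan by one window pass per read per DISTINCT kmer
-- length into a set, then counts each kmer as (its multiplicity in kmers) * (#reads whose window
-- set contains it).  Equivalence of the returned dict is proved below.

-- ===== PORT A =====
def count_all_kmers (fastq_reads : List String) (kmers : List String) : List (String × Int) :=
  -- kmer_counters = {x: 0 for x in kmers}
  let kmer_counters : PySem.Dict String Int :=
    kmers.foldl (fun d x => d.insert x 0) PySem.Dict.empty
  -- for this_read in fastq_reads: for k in kmers:
  --   if this_read.find(k) >= 0: kmer_counters[k] += 1   (k is always a key here)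
  let kmer_counters :=
    fastq_reads.foldl (fun d this_read =>
      kmers.foldl (fun d k =>
        if (0 : Int) ≤ PySem.Str.find this_read k then d.modify k 0 (· + 1) else d) d)
      kmer_counters
  kmer_counters.items

-- ===== PORT B =====
def count_all_kmers_alt (fastq_reads : List String) (kmers : List String) : List (String × Int) :=
  -- lengths = {len(k) for k in kmers}
  let lengths : PySem.Set Int := PySem.Set.ofList (kmers.map PySem.Str.len)
  -- read_subs: for each read, the set of its windows of each relevant length
  let read_subs : List (PySem.Set String) :=
    fastq_reads.foldl (fun acc read =>
      acc ++ [lengths.foldl (fun subs L =>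
        (PySem.List.pyRange 0 (PySem.Str.len read - L + 1)).foldl (fun subs i =>
          subs.add (PySem.Str.slice read (some i) (some (i + L)))) subs) PySem.Set.empty]) []
  -- mult[k] = mult.get(k, 0) + 1
  let mult : PySem.Dict String Int :=
    kmers.foldl (fun d k => d.insert k (d.getD k 0 + 1)) PySem.Dict.empty
  -- {k: m * sum(1 for subs in read_subs if k in subs) for k, m in mult.items()}
  mult.items.map (fun p =>
    (p.1, p.2 * (read_subs.foldl (fun acc subs => if subs.contains p.1 then acc + 1 else acc) 0)))

-- ===== PRECONDITION & SPEC =====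
def Spec_count_all_kmers (fastq_reads : List String) (kmers : List String) (out : List (String × Int)) : Prop := out = count_all_kmers_alt fastq_reads kmers
instance (fastq_reads : List String) (kmers : List String) (out : List (String × Int)) : Decidable (Spec_count_all_kmers fastq_reads kmers out) := by unfold Spec_count_all_kmers; infer_instance

-- ===== CLAIM (what is proved, stated in full; the proofs are below) =====
def Claim_equal_count_all_kmers : Prop := ∀ (fastq_reads : List String) (kmers : List String), Dom_count_all_kmers fastq_reads kmers → Spec_count_all_kmers fastq_reads kmers (count_all_kmers fastq_reads kmers)

-- ===== LEMMAS AND PROOFS =====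

-- membership in a fold of Set.add over f
theorem pv_mem_foldl_add {α β : Type} [BEq α] [LawfulBEq α] (f : β → α) (l : List β)
    (s : PySem.Set α) (x : α) :
    x ∈ l.foldl (fun s a => s.add (f a)) s ↔ x ∈ s ∨ ∃ a ∈ l, f a = x := by
  induction l generalizing s with
  | nil => simp
  | cons b t ih => simp [ih, PySem.Set.mem_add]; tauto

-- membership in the nested window fold of B
theorem pv_mem_subs (read : String) (lengths : List Int) (s : PySem.Set String) (x : String) :
    x ∈ lengths.foldl (fun subs L =>
        (PySem.List.pyRange 0 (PySem.Str.len read - L + 1)).foldl (fun subs i =>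
          subs.add (PySem.Str.slice read (some i) (some (i + L)))) subs) s
    ↔ x ∈ s ∨ ∃ L ∈ lengths, ∃ i ∈ PySem.List.pyRange 0 (PySem.Str.len read - L + 1),
        PySem.Str.slice read (some i) (some (i + L)) = x := by
  induction lengths generalizing s with
  | nil => simp
  | cons L t ih =>
      simp only [List.foldl_cons]
      rw [ih, pv_mem_foldl_add]
      simp only [List.mem_cons]
      constructor
      · rintro ((hs | ⟨i, hi, hx⟩) | ⟨L', hL', i, hi, hx⟩)
        · exact Or.inl hs
        · exact Or.inr ⟨L, Or.inl rfl, i, hi, hx⟩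
        · exact Or.inr ⟨L', Or.inr hL', i, hi, hx⟩
      · rintro (hs | ⟨L', (rfl | hL'), i, hi, hx⟩)
        · exact Or.inl (Or.inl hs)
        · exact Or.inl (Or.inr ⟨i, hi, hx⟩)
        · exact Or.inr ⟨L', hL', i, hi, hx⟩

-- a window of a read is an infix of it
theorem pv_slice_infix (read k : String) (i L : Int) (hi : 0 ≤ i) (hL : 0 ≤ L)
    (h : PySem.Str.slice read (some i) (some (i + L)) = k) :
    k.toList <:+: read.toList := by
  have h2 := congrArg String.toList h
  rw [PySem.Str.toList_slice, PySem.Chars.slice_eq_listSlice,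
      PySem.List.slice_toNat read.toList hi (by omega)] at h2
  rw [← h2]
  exact ((List.take_prefix _ _).isInfix).trans ((List.drop_suffix _ _).isInfix)

-- an infix of a read is one of its windows of its own length
theorem pv_infix_window (read k : String) (h : k.toList <:+: read.toList) :
    ∃ i ∈ PySem.List.pyRange 0 (PySem.Str.len read - PySem.Str.len k + 1),
      PySem.Str.slice read (some i) (some (i + PySem.Str.len k)) = k := by
  obtain ⟨s, t, hst⟩ := h
  have hlen : read.toList.length = s.length + k.toList.length + t.length := by
    rw [← hst]; simp; omega
  refine ⟨(s.length : Int), ?_, ?_⟩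
  · rw [PySem.List.mem_pyRange_one]
    constructor
    · positivity
    · simp [PySem.Str.len_eq, hlen]; omega
  · rw [← String.toList_inj, PySem.Str.toList_slice, PySem.Chars.slice_eq_listSlice,
        PySem.Str.len_eq, PySem.List.slice_natCast_add]
    rw [← hst]
    simp

-- value of A's initial dict is 0 everywhere
theorem pv_getD_init (kmers : List String) (d : PySem.Dict String Int)
    (h : ∀ v, d.getD v 0 = 0) (v : String) :
    (kmers.foldl (fun d x => d.insert x 0) d).getD v 0 = 0 := by
  induction kmers generalizing d with
  | nil => exact h v
  | cons k t ih =>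
      refine ih _ (fun w => ?_)
      rw [PySem.Dict.getD_insert]
      split <;> simp [h]

-- value of A's counting loop
theorem pv_getD_loop (fastq_reads kmers : List String) (d : PySem.Dict String Int) (v : String) :
    (fastq_reads.foldl (fun d this_read =>
        kmers.foldl (fun d k =>
          if (0 : Int) ≤ PySem.Str.find this_read k then d.modify k 0 (· + 1) else d) d) d).getD v 0
    = d.getD v 0 + (fastq_reads.map (fun r =>
        ((kmers.filter (fun k => decide ((0 : Int) ≤ PySem.Str.find r k))).count v : Int))).sum := by
  induction fastq_reads generalizing d with
  | nil => simp
  | cons r t ih =>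
      simp only [List.foldl_cons, List.map_cons, List.sum_cons, ih]
      rw [PySem.List.foldl_ite_eq_foldl_filter, PySem.Dict.getD_foldl_modify_add_one]
      ring

-- Set.update by elements already present is the identity
theorem pv_set_update_of_subset {α : Type} [BEq α] [LawfulBEq α] (s : PySem.Set α) (l : List α)
    (h : ∀ x ∈ l, x ∈ s) : PySem.Set.update s l = s := by
  induction l generalizing s with
  | nil => rfl
  | cons a t ih =>
      have ha : PySem.Set.add s a = s := by
        simp only [PySem.Set.add, PySem.Set.contains]
        have : a ∈ s := h a (List.mem_cons_self)
        simp [this]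
      show PySem.Set.update (PySem.Set.add s a) t = s
      rw [ha]
      exact ih s (fun x hx => h x (List.mem_cons_of_mem _ hx))

-- A's counting loop keeps the key list unchanged
theorem pv_keys_loop (fastq_reads kmers : List String) (d : PySem.Dict String Int)
    (h : ∀ k ∈ kmers, k ∈ d.keys) :
    (fastq_reads.foldl (fun d this_read =>
        kmers.foldl (fun d k =>
          if (0 : Int) ≤ PySem.Str.find this_read k then d.modify k 0 (· + 1) else d) d) d).keys
    = d.keys := by
  induction fastq_reads generalizing d with
  | nil => rfl
  | cons r t ih =>
      simp only [List.foldl_cons]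
      have hk : (kmers.foldl (fun d k =>
          if (0 : Int) ≤ PySem.Str.find r k then d.modify k 0 (· + 1) else d) d).keys = d.keys := by
        rw [PySem.List.foldl_ite_eq_foldl_filter,
            PySem.Dict.keys_foldl_modify _ _ (fun _ _ v => v + 1)]
        exact pv_set_update_of_subset _ _
          (fun x hx => h x (List.mem_of_mem_filter hx))
      rw [ih _ (by rw [hk]; exact h), hk]

-- sum of a constant under an indicator is constant times a count
theorem pv_sum_ite (reads : List String) (q : String → Bool) (c : Int) :
    (reads.map (fun r => if q r then c else 0)).sum = c * (reads.countP q : Int) := by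
  induction reads with
  | nil => simp
  | cons r t ih =>
      by_cases h : q r
      · simp [h, ih]; ring
      · simp [h, ih]

-- bridge: a kmer is in B's window set of a read iff A's str.find sees it
theorem pv_contains_iff (kmers : List String) (r k : String) (hk : k ∈ kmers) :
    (PySem.Set.contains
      ((PySem.Set.ofList (kmers.map PySem.Str.len)).foldl (fun subs L =>
        (PySem.List.pyRange 0 (PySem.Str.len r - L + 1)).foldl (fun subs i =>
          subs.add (PySem.Str.slice r (some i) (some (i + L)))) subs) PySem.Set.empty) k)
    = decide ((0 : Int) ≤ PySem.Str.find r k) := by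
  have hmem : (k ∈ (PySem.Set.ofList (kmers.map PySem.Str.len)).foldl (fun subs L =>
        (PySem.List.pyRange 0 (PySem.Str.len r - L + 1)).foldl (fun subs i =>
          subs.add (PySem.Str.slice r (some i) (some (i + L)))) subs) PySem.Set.empty)
      ↔ ((0 : Int) ≤ PySem.Str.find r k) := by
    rw [pv_mem_subs, PySem.Str.find_nonneg_iff]
    constructor
    · rintro (hfalse | ⟨L, hL, i, hi, hslice⟩)
      · simp [PySem.Set.empty] at hfalse
      · rw [PySem.Set.mem_ofList] at hL
        obtain ⟨k', _, rfl⟩ := List.mem_map.mp hL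
        have hL0 : (0 : Int) ≤ PySem.Str.len k' := by
          rw [PySem.Str.len_eq]; positivity
        exact pv_slice_infix r k i _ (PySem.List.mem_pyRange_one.mp hi).1 hL0 hslice
    · intro hinf
      refine Or.inr ⟨PySem.Str.len k, ?_, pv_infix_window r k hinf⟩
      rw [PySem.Set.mem_ofList]
      exact List.mem_map.mpr ⟨k, hk, rfl⟩
  simp only [PySem.Set.contains]
  rw [Bool.eq_iff_iff]
  simp only [List.contains_iff_mem, decide_eq_true_eq]
  exact hmem

-- count in a filtered list
theorem pv_count_filter {α : Type} [BEq α] [LawfulBEq α] (l : List α) (p : α → Bool) (a : α) :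
    (l.filter p).count a = if p a then l.count a else 0 := by
  by_cases h : p a
  · simp [h, List.count_filter h]
  · rw [if_neg h, List.count_eq_zero]
    intro hmem'
    exact h (List.of_mem_filter hmem')

-- ===== VERDICT (by name: the statement is the Claim_ definition above) =====
theorem count_all_kmers_spec : Claim_equal_count_all_kmers := by
  intro fastq_reads kmers _
  show count_all_kmers fastq_reads kmers = count_all_kmers_alt fastq_reads kmers
  simp only [count_all_kmers, count_all_kmers_alt]
  -- B side into closed form
  rw [PySem.List.foldl_append_singleton_eq_map, PySem.Dict.foldl_insert_getD_add_one_eq_counter,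
      PySem.Dict.items_counter]
  -- A side: keys of the final dict
  have hkeys0 : (kmers.foldl (fun d x => d.insert x (0 : Int)) PySem.Dict.empty).keys
      = PySem.Set.ofList kmers := by
    rw [PySem.Dict.keys_foldl_insert kmers (fun _ _ => 0)]
    rfl
  have hmemkeys : ∀ k ∈ kmers,
      k ∈ (kmers.foldl (fun d x => d.insert x (0 : Int)) PySem.Dict.empty).keys := by
    intro k hk; rw [hkeys0, PySem.Set.mem_ofList]; exact hk
  have hkeys : (fastq_reads.foldl (fun d this_read =>
        kmers.foldl (fun d k =>
          if (0 : Int) ≤ PySem.Str.find this_read k then d.modify k 0 (· + 1) else d) d)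
        (kmers.foldl (fun d x => d.insert x (0 : Int)) PySem.Dict.empty)).keys
      = PySem.Set.ofList kmers := by
    exact (pv_keys_loop fastq_reads kmers _ hmemkeys).trans hkeys0
  have hnodup : (fastq_reads.foldl (fun d this_read =>
        kmers.foldl (fun d k =>
          if (0 : Int) ≤ PySem.Str.find this_read k then d.modify k 0 (· + 1) else d) d)
        (kmers.foldl (fun d x => d.insert x (0 : Int)) PySem.Dict.empty)).keys.Nodup := by
    rw [hkeys]; exact PySem.Set.nodup_ofList kmers
  rw [PySem.Dict.items_eq_map_keys _ hnodup 0, hkeys, List.map_map]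
  refine List.map_congr_left (fun k hk => ?_)
  rw [PySem.Set.mem_ofList] at hk
  simp only [Function.comp]
  refine Prod.ext rfl ?_
  rw [pv_getD_loop, pv_getD_init kmers PySem.Dict.empty (fun v => PySem.Dict.getD_empty v 0) k,
      zero_add]
  have hterm : ∀ r ∈ fastq_reads,
      ((kmers.filter (fun k' => decide ((0 : Int) ≤ PySem.Str.find r k'))).count k : Int)
      = (if (PySem.Set.contains
          ((PySem.Set.ofList (kmers.map PySem.Str.len)).foldl (fun subs L =>
            (PySem.List.pyRange 0 (PySem.Str.len r - L + 1)).foldl (fun subs i =>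
              subs.add (PySem.Str.slice r (some i) (some (i + L)))) subs) PySem.Set.empty) k)
         then (kmers.count k : Int) else 0) := by
    intro r _
    rw [pv_contains_iff kmers r k hk, pv_count_filter]
    split <;> simp_all
  rw [List.map_congr_left hterm, pv_sum_ite, PySem.List.foldl_if_add_one, zero_add]
  simp only [List.nil_append, List.countP_map]
  rfl
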